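-- pv_equiv track=rewrite | github.com/congyingTech/Basic-Algorithm | old-leetcode/GetOffers/9.py | jumpFloorII
-- ===== SOURCE A (Python) =====
-- def jumpFloorII(number):
--     lists = []
--     result = 1
--     if number == 0:
--         return 0
--     if number == 1:
--         return result
--     lists.append(result)
--     lists.append(result)
--     i = 2
--     while i <= number:
--         lists.append(sum(lists[:i]))
--         i += 1
--     return lists[i - 1]
-- ===== SOURCE B (Python) =====
-- def jumpFloorII(number):
--     # closed form: each of floors 1..n-1 is either a landing point or not -> 2**(n-1)
--     return 0 if number == 0 else 2 ** (number - 1)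
-- ===== Notes on version B (the rewrite author's own statement) =====
-- stated objective: faster
-- what changed: Replaced the quadratic list-building loop (append sum of the whole prefix each step) with the closed form 2^(n-1) computed by integer pow.
-- outside the precondition, e.g. on jumpFloorII(-1): A returns 1, B returns 0.25
import Mathlib
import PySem

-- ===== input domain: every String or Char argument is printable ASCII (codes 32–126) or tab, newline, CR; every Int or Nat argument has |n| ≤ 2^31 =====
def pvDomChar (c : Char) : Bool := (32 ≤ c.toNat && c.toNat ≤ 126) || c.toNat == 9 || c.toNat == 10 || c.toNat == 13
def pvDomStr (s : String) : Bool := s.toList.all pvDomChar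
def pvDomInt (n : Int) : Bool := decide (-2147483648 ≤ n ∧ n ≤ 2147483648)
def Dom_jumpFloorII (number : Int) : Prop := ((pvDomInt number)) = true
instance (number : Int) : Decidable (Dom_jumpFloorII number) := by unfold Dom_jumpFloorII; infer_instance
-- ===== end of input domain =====

-- B replaces A's quadratic prefix-sum list loop with the closed form 2^(n-1) (asymptotically faster).


-- ===== PORT A =====
-- while i <= number: lists.append(sum(lists[:i])); i += 1   — returns (final lists, final i)
def jumpFloorII.loop (number : Int) (i : Int) (lists : List Int) : List Int × Int :=
  if i ≤ number then
    jumpFloorII.loop number (i + 1) (lists ++ [(PySem.List.slice lists none (some i)).sum])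
  else (lists, i)
termination_by (number + 1 - i).toNat
decreasing_by omega

def jumpFloorII (number : Int) : Int :=
  let result : Int := 1
  if number == 0 then 0
  else if number == 1 then result
  else
    let lists : List Int := [result, result]
    let r := jumpFloorII.loop number 2 lists
    -- lists[i-1]: on this path the index is always in range, so pyGetD's default is never used
    PySem.List.pyGetD r.1 (r.2 - 1) 0

-- ===== PORT B =====
def jumpFloorII_alt (number : Int) : Int :=
  if number == 0 then 0 else 2 ^ (number - 1).toNat

-- ===== PRECONDITION & SPEC =====
-- Pre_ excludes negative number, on which A's returned 1 is leftover loop state (lists=[1,1],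
-- the while loop never runs) and B's pow yields a non-integer float.
def Pre_jumpFloorII (number : Int) : Prop := 0 ≤ number
instance (number : Int) : Decidable (Pre_jumpFloorII number) := by unfold Pre_jumpFloorII; infer_instance
def pvWitness_jumpFloorII : Int := (3)
def Spec_jumpFloorII (number : Int) (out : Int) : Prop := out = jumpFloorII_alt number
instance (number : Int) (out : Int) : Decidable (Spec_jumpFloorII number out) := by unfold Spec_jumpFloorII; infer_instance

-- ===== CLAIM (what is proved, stated in full; the proofs are below) =====
def Claim_equal_jumpFloorII : Prop := ∀ (number : Int), Dom_jumpFloorII number → Pre_jumpFloorII number → Spec_jumpFloorII number (jumpFloorII number)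

-- ===== LEMMAS AND PROOFS =====

-- Loop invariant: starting at i = number - n with a list of length i, the loop terminates at
-- i = number + 1 and lists[number] is (sum of the initial list) · 2^n.
theorem jumpFloorII_loop_spec (number : Int) : ∀ (n : Nat) (i : Int) (lists : List Int),
    i = number - n → 1 ≤ i → (lists.length : Int) = i →
    (jumpFloorII.loop number i lists).2 = number + 1 ∧
    PySem.List.pyGetD (jumpFloorII.loop number i lists).1 number 0 = lists.sum * 2 ^ n := by
  intro n
  induction n with
  | zero =>
    intro i lists hi h1 hlen
    have hi' : i = number := by omega
    rw [jumpFloorII.loop]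
    have hcond : i ≤ number := by omega
    simp only [if_pos hcond]
    rw [jumpFloorII.loop]
    have hstop : ¬ (i + 1 ≤ number) := by omega
    simp only [if_neg hstop]
    constructor
    · omega
    · have hsl : PySem.List.slice lists none (some i) = lists := by
        have : i = ((lists.length : Nat) : Int) := by omega
        rw [this, PySem.List.slice_to_natCast]
        simp
      rw [hsl]
      have hidx : number = ((lists.length : Nat) : Int) := by omega
      rw [hidx, PySem.List.pyGetD_natCast]
      simp [List.getD, pow_zero, mul_one]
  | succ n ih =>
    intro i lists hi h1 hlen
    rw [jumpFloorII.loop]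
    have hcond : i ≤ number := by omega
    simp only [if_pos hcond]
    have hsl : PySem.List.slice lists none (some i) = lists := by
      have : i = ((lists.length : Nat) : Int) := by omega
      rw [this, PySem.List.slice_to_natCast]
      simp
    rw [hsl]
    have := ih (i + 1) (lists ++ [lists.sum]) (by omega) (by omega)
      (by simp; omega)
    refine ⟨this.1, ?_⟩
    rw [this.2]
    simp [pow_succ]
    ring

-- ===== VERDICT (by name: the statement is the Claim_ definition above) =====
theorem jumpFloorII_spec : Claim_equal_jumpFloorII := by
  intro number _ hpre
  have hpos : 0 ≤ number := hpre
  unfold Spec_jumpFloorII jumpFloorII jumpFloorII_alt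
  by_cases h0 : number = 0
  · simp [h0]
  · by_cases h1 : number = 1
    · simp [h1]
    · have h2 : 2 ≤ number := by omega
      have beq0 : (number == 0) = false := by simp [h0]
      have beq1 : (number == 1) = false := by simp [h1]
      simp only [beq0, beq1, if_false, Bool.false_eq_true]
      have hloop := jumpFloorII_loop_spec number (number - 2).toNat 2 [1, 1]
        (by omega) (by omega) (by simp)
      rw [hloop.1]
      have hsub : number + 1 - 1 = number := by ring
      rw [hsub, hloop.2]
      have hsum : ([1, 1] : List Int).sum = 2 := by decide
      rw [hsum, ← pow_succ']
      congr 1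
      omega
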